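-- pv_equiv track=rewrite | github.com/saketora95/ROAutoTranslator | compare_process.py | build_compare_data
-- ===== SOURCE A (Python) =====
-- def build_compare_data(raw_data):
--     data_dict = {}
--     for line in raw_data:
--         if line == '\n' or line[0] == '#':
--             pass
--
--         else:
--             if ' = ' in line:
--                 line = line[:-1].split(' = ')
--                 line_length = len(line[0])
--
--                 if line_length in data_dict:
--                     data_dict[line_length][line[0]] = line[1]
--
--                 else:
--                     data_dict[line_length] = {}
--                     data_dict[line_length][line[0]] = line[1]
--
--     dict_length = []
--     for length in data_dict:
--         dict_length.append(length)
--
--     dict_length = sorted(dict_length, reverse=True)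
--
--     sort_data_dict = {}
--     for length in dict_length:
--         sort_data_dict[length] = data_dict[length].copy()
--
--     return sort_data_dict
-- ===== SOURCE B (Python) =====
-- def build_compare_data(raw_data):
--     pairs = []
--     for line in raw_data:
--         if line == '\n' or line[0] == '#':
--             continue
--         if ' = ' in line:
--             parts = line[:-1].split(' = ')
--             pairs.append((parts[0], parts[1]))
--     lengths = sorted({len(k) for k, _ in pairs}, reverse=True)
--     return {ln: dict(kv for kv in pairs if len(kv[0]) == ln) for ln in lengths}
-- ===== Notes on version B (the rewrite author's own statement) =====
-- stated objective: simpler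
-- what changed: A builds a nested length-keyed dict incrementally during parsing and then sorts its keys and copies each inner dict; B parses once into a flat (key, value) pair list and builds the result directly as a dict comprehension over the sorted distinct key lengths, filtering the pairs per length.
import Mathlib
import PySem

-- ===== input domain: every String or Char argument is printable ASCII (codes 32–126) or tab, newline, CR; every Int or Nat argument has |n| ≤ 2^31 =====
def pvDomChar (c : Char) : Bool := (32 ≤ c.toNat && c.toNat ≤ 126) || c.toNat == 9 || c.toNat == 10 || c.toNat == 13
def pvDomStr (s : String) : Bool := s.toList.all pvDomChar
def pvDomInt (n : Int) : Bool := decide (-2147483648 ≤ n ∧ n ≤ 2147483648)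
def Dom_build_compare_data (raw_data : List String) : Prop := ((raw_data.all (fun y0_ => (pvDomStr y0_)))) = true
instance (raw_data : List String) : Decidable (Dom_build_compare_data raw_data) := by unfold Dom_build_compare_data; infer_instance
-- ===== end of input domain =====

-- B replaces A's incremental nested-dict bucketing (plus a separate sort-keys-and-copy pass)
-- with: one flat parse pass into (key, value) pairs, then sorted distinct key lengths and a
-- dict comprehension filtering the pairs per length (objective: simpler, no speed claim).

-- ===== PORT A =====
-- A's loop body (the for-loop over raw_data), as a named helper
def buildStepA (d : PySem.Dict Int (PySem.Dict String String)) (line : String) :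
    PySem.Dict Int (PySem.Dict String String) :=
  if line == "\n" || PySem.Str.pyGet? line 0 == some '#' then d
  else if PySem.Str.isIn " = " line then
    let parts := (PySem.Str.split? (PySem.Str.slice line none (some (-1))) " = ").getD []
    let k := parts.headD ""                      -- line[0]; split is never empty
    let v := (PySem.List.pyGet? parts 1).getD "" -- line[1]; IndexError excluded by Pre_
    let line_length : Int := PySem.Str.len k
    if d.contains line_length then
      d.insert line_length ((d.getD line_length PySem.Dict.empty).insert k v)
    else
      d.insert line_length ((PySem.Dict.empty : PySem.Dict String String).insert k v)
  else d

def build_compare_data (raw_data : List String) : List (Int × List (String × String)) :=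
  let data_dict := raw_data.foldl buildStepA PySem.Dict.empty
  let dict_length := data_dict.keys.foldl (fun acc length => acc ++ [length]) []
  let dict_length := PySem.List.sorted dict_length (fun x => x) true
  let sort_data_dict :=
    dict_length.foldl (fun sd length => sd.insert length (data_dict.getD length PySem.Dict.empty))
      (PySem.Dict.empty : PySem.Dict Int (PySem.Dict String String))
  sort_data_dict.items.map (fun p => (p.1, p.2.items))

-- ===== PORT B =====
-- B's parse-loop body, as a named helper
def parseStepB (ps : List (String × String)) (line : String) : List (String × String) :=
  if line == "\n" || PySem.Str.pyGet? line 0 == some '#' then ps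
  else if PySem.Str.isIn " = " line then
    let parts := (PySem.Str.split? (PySem.Str.slice line none (some (-1))) " = ").getD []
    ps ++ [(parts.headD "", (PySem.List.pyGet? parts 1).getD "")]
  else ps

def build_compare_data_alt (raw_data : List String) : List (Int × List (String × String)) :=
  let pairs := raw_data.foldl parseStepB []
  let lengths : List Int :=
    PySem.List.sorted (PySem.Set.ofList (pairs.map (fun kv => PySem.Str.len kv.1))) (fun x => x) true
  lengths.map (fun ln =>
    (ln, ((pairs.filter (fun kv => PySem.Str.len kv.1 == ln)).foldl
            (fun m kv => m.insert kv.1 kv.2) (PySem.Dict.empty : PySem.Dict String String)).items))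

-- ===== PRECONDITION & SPEC =====
-- Pre_ excludes exactly the inputs where Python A raises IndexError: an empty-string line
-- (line[0]) or a processed line whose ' = ' separator disappears after dropping the last
-- character (then split gives a single part and line[1] raises); B raises there too.
def Pre_build_compare_data (raw_data : List String) : Prop :=
  ∀ line ∈ raw_data, line ≠ "" ∧
    (¬ PySem.Str.pyGet? line 0 = some '#' → PySem.Str.isIn " = " line = true →
      PySem.Str.isIn " = " (PySem.Str.slice line none (some (-1))) = true)
instance (raw_data : List String) : Decidable (Pre_build_compare_data raw_data) := by
  unfold Pre_build_compare_data; infer_instance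

def pvWitness_build_compare_data : List String :=
  ["bb = y\n", "# comment\n", "a = x\n", "\n", "cc = zz\n", "bb = w\n", "noise"]

def Spec_build_compare_data (raw_data : List String) (out : List (Int × List (String × String))) : Prop := out = build_compare_data_alt raw_data
instance (raw_data : List String) (out : List (Int × List (String × String))) : Decidable (Spec_build_compare_data raw_data out) := by unfold Spec_build_compare_data; infer_instance

-- ===== CLAIM (what is proved, stated in full; the proofs are below) =====
def Claim_equal_build_compare_data : Prop := ∀ (raw_data : List String), Dom_build_compare_data raw_data → Pre_build_compare_data raw_data → Spec_build_compare_data raw_data (build_compare_data raw_data)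

-- ===== LEMMAS AND PROOFS =====

-- the bucket-insertion step A performs per accepted (key, value) pair
def pvGStep (d : PySem.Dict Int (PySem.Dict String String)) (kv : String × String) :
    PySem.Dict Int (PySem.Dict String String) :=
  d.insert (PySem.Str.len kv.1) ((d.getD (PySem.Str.len kv.1) PySem.Dict.empty).insert kv.1 kv.2)

theorem parseStepB_accum (raw : List String) (ps : List (String × String)) :
    raw.foldl parseStepB ps = ps ++ raw.foldl parseStepB [] := by
  induction raw generalizing ps with
  | nil => simp
  | cons line rest ih =>
    rw [List.foldl_cons, List.foldl_cons, ih, ih (parseStepB [] line)]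
    unfold parseStepB
    split_ifs <;> simp only [List.nil_append, List.append_assoc]

-- one loop iteration of A is the bucket-fold of the (zero or one) pair B parses from the line
theorem pvStep_eq (d : PySem.Dict Int (PySem.Dict String String)) (line : String) :
    buildStepA d line = (parseStepB [] line).foldl pvGStep d := by
  unfold buildStepA parseStepB pvGStep
  split_ifs with h1 h2
  · rfl
  · generalize (PySem.Str.split? (PySem.Str.slice line none (some (-1))) " = ").getD [] = parts
    dsimp only
    split_ifs with h3
    · rfl
    · simp only [List.nil_append, List.foldl_cons, List.foldl_nil]
      rw [PySem.Dict.getD_of_not_contains d PySem.Dict.empty (Bool.eq_false_iff.mpr h3)]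
  · rfl

-- A's parse-and-bucket loop is exactly bucketing of B's flat pair list
theorem pvA_loop_eq (raw : List String) (d : PySem.Dict Int (PySem.Dict String String)) :
    raw.foldl buildStepA d = (raw.foldl parseStepB []).foldl pvGStep d := by
  induction raw generalizing d with
  | nil => rfl
  | cons line rest ih =>
    rw [List.foldl_cons, List.foldl_cons, ih, parseStepB_accum rest (parseStepB [] line),
      List.foldl_append, pvStep_eq]

theorem pvGetD_bucket (ps : List (String × String)) (d : PySem.Dict Int (PySem.Dict String String))
    (ln : Int) :
    (ps.foldl pvGStep d).getD ln PySem.Dict.empty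
      = (ps.filter (fun kv => PySem.Str.len kv.1 == ln)).foldl
          (fun m kv => m.insert kv.1 kv.2) (d.getD ln PySem.Dict.empty) := by
  induction ps generalizing d with
  | nil => rfl
  | cons kv rest ih =>
    simp only [List.foldl_cons, List.filter_cons]
    by_cases h : PySem.Str.len kv.1 = ln
    · simp only [h, beq_self_eq_true, if_true, List.foldl_cons]
      rw [ih]
      have hg : (pvGStep d kv).getD ln PySem.Dict.empty
          = (d.getD ln PySem.Dict.empty).insert kv.1 kv.2 := by
        unfold pvGStep
        rw [h, PySem.Dict.getD_insert_self]
      rw [hg]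
    · have hb : (PySem.Str.len kv.1 == ln) = false := beq_eq_false_iff_ne.mpr h
      simp only [hb, Bool.false_eq_true, if_false]
      rw [ih]
      have hg : (pvGStep d kv).getD ln PySem.Dict.empty = d.getD ln PySem.Dict.empty := by
        unfold pvGStep
        exact PySem.Dict.getD_insert_of_ne d _ _ (fun hlk => h hlk.symm)
      rw [hg]

theorem pvKeys_bucket (ps : List (String × String)) :
    (ps.foldl pvGStep PySem.Dict.empty).keys
      = PySem.Set.ofList (ps.map (fun kv => PySem.Str.len kv.1)) := by
  have h := PySem.Dict.keys_foldl_insert_key ps (fun kv => PySem.Str.len kv.1)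
      (fun d kv => (d.getD (PySem.Str.len kv.1) PySem.Dict.empty).insert kv.1 kv.2)
      PySem.Dict.empty
  simpa [pvGStep, PySem.Dict.keys_empty, PySem.Set.update_nil_left] using h

-- ===== VERDICT (by name: the statement is the Claim_ definition above) =====
theorem build_compare_data_spec : Claim_equal_build_compare_data := by
  intro raw _ _
  unfold Spec_build_compare_data
  show build_compare_data raw = build_compare_data_alt raw
  unfold build_compare_data build_compare_data_alt
  simp only [pvA_loop_eq, PySem.List.foldl_append_singleton_eq_self, List.nil_append]
  have hkeys := pvKeys_bucket (raw.foldl parseStepB [])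
  have hnodupk : (List.foldl pvGStep PySem.Dict.empty (raw.foldl parseStepB [])).keys.Nodup := by
    rw [hkeys]; exact PySem.Set.nodup_ofList _
  have hnodup : (PySem.List.sorted (List.foldl pvGStep PySem.Dict.empty
      (raw.foldl parseStepB [])).keys (fun x => x) true).Nodup :=
    (PySem.List.sorted_perm _ _ _).nodup_iff.mpr hnodupk
  rw [PySem.Dict.items_foldl_insert_fresh _ (fun ln => ln)
      (fun ln => (List.foldl pvGStep PySem.Dict.empty (raw.foldl parseStepB [])).getD ln
        PySem.Dict.empty) _
      (fun a _ => PySem.Dict.contains_empty a) (by simpa using hnodup)]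
  have hie : (PySem.Dict.empty : PySem.Dict Int (PySem.Dict String String)).items = [] := rfl
  rw [hie, List.nil_append, List.map_map, hkeys]
  apply List.map_congr_left
  intro ln _
  simp only [Function.comp_apply]
  rw [pvGetD_bucket, PySem.Dict.getD_empty]
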